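-- pv_equiv track=rewrite | github.com/opa-oz/codewars-instanity | Catching Car Mileage Numbers/solution.py | incremental
-- ===== SOURCE A (Python) =====
-- def incremental(s):
--     if len(s) < 3:
--         return False
--     digits = [int(l) for l in s]
--     curr = digits[0]
--
--     for i in range(1, len(s)):
--         v = digits[i]
--         if curr == 0 and v > 0:
--             return False
--         if (curr == 9 and v == 0) or v == curr + 1:
--             curr = v
--         else:
--             return False
--
--     return True
-- ===== SOURCE B (Python) =====
-- def incremental(s):
--     if len(s) < 3:
--         return False
--     digits = [int(c) for c in s]
--     expected = []
--     cur = digits[0]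
--     for _ in range(len(digits)):
--         expected.append(cur)
--         if cur <= 0:
--             cur = -1      # nothing may legally follow a zero
--         elif cur == 9:
--             cur = 0
--         else:
--             cur = cur + 1
--     return expected == digits
-- ===== Notes on version B (the rewrite author's own statement) =====
-- stated objective: alternative
-- what changed: Replaces A's online early-return state machine with generate-then-compare: B builds the full canonical cyclic-increment sequence from the first digit (with a -1 sentinel after zero) and returns whether it equals the digit list.
import Mathlib
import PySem

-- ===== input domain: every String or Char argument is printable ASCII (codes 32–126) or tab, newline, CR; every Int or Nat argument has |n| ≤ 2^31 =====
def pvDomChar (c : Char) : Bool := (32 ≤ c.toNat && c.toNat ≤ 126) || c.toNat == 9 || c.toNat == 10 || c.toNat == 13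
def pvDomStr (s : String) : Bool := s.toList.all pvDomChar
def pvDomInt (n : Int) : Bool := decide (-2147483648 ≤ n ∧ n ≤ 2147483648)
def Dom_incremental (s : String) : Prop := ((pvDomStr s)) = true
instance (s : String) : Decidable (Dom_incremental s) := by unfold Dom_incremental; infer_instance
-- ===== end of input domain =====

-- B is an alternative decomposition (build the canonical expected sequence, then compare);
-- return value only, no side effects.

-- ===== PORT A =====
-- the for-loop of A with its early returns, state curr, remaining digits
def incLoopA (curr : Int) : List Int → Bool
  | [] => true
  | v :: rest =>
    if curr = 0 ∧ v > 0 then false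
    else if (curr = 9 ∧ v = 0) ∨ v = curr + 1 then incLoopA v rest
    else false

def incremental (s : String) : Bool :=
  if s.toList.length < 3 then false
  else
    -- int(l): exact on the digit characters admitted by Pre_incremental
    match s.toList.map (fun c => (c.toNat : Int) - 48) with
    | [] => false            -- unreachable: length ≥ 3
    | d :: rest => incLoopA d rest

-- ===== PORT B =====
def nextB (cur : Int) : Int := if cur ≤ 0 then -1 else if cur = 9 then 0 else cur + 1

-- B's for-loop: build the expected sequence of given length starting at cur
def incLoopB (cur : Int) : Nat → List Int
  | 0 => []
  | n + 1 => cur :: incLoopB (nextB cur) n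

def incremental_alt (s : String) : Bool :=
  if s.toList.length < 3 then false
  else
    -- int(c): exact on the digit characters admitted by Pre_incremental
    match s.toList.map (fun c => (c.toNat : Int) - 48) with
    | [] => false            -- unreachable: length ≥ 3
    | d :: _ => decide (incLoopB d (s.toList.map (fun c => (c.toNat : Int) - 48)).length
                          = s.toList.map (fun c => (c.toNat : Int) - 48))

-- ===== PRECONDITION & SPEC =====
-- Pre_ excludes exactly the strings on which A raises ValueError (len ≥ 3 with a non-digit char);
-- B raises there too.
def Pre_incremental (s : String) : Prop :=
  s.toList.length < 3 ∨ s.toList.all Char.isDigit = true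
instance (s : String) : Decidable (Pre_incremental s) := by unfold Pre_incremental; infer_instance
def pvWitness_incremental : String := "1234"

def Spec_incremental (s : String) (out : Bool) : Prop := out = incremental_alt s
instance (s : String) (out : Bool) : Decidable (Spec_incremental s out) := by unfold Spec_incremental; infer_instance

-- ===== CLAIM (what is proved, stated in full; the proofs are below) =====
def Claim_equal_incremental : Prop := ∀ (s : String), Dom_incremental s → Pre_incremental s → Spec_incremental s (incremental s)

-- ===== LEMMAS AND PROOFS =====

-- loop invariant: A's state machine on the remaining digits agrees with comparing
-- against B's generated sequence, for digit-range state and inputs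
theorem incLoop_agree (rest : List Int) : ∀ curr : Int, 0 ≤ curr → curr ≤ 9 →
    (∀ v ∈ rest, 0 ≤ v ∧ v ≤ 9) →
    incLoopA curr rest = decide (incLoopB (nextB curr) rest.length = rest) := by
  induction rest with
  | nil => intro curr _ _ _; simp [incLoopA, incLoopB]
  | cons v rest ih =>
    intro curr h0 h9 hm
    obtain ⟨hv0, hv9⟩ := hm v (by simp)
    have hrest : ∀ w ∈ rest, 0 ≤ w ∧ w ≤ 9 := fun w hw => hm w (by simp [hw])
    simp only [incLoopA, List.length_cons, incLoopB]
    by_cases h1 : curr = 0 ∧ v > 0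
    · simp only [if_pos h1]
      have : nextB curr = -1 := by simp [nextB, h1.1]
      rw [this]
      have : (-1 : Int) ≠ v := by omega
      simp [this]
    · simp only [if_neg h1]
      by_cases h2 : (curr = 9 ∧ v = 0) ∨ v = curr + 1
      · simp only [if_pos h2]
        have hnext : nextB curr = v := by
          unfold nextB
          rcases h2 with ⟨hc, hv⟩ | hv <;> split_ifs <;> omega
        rw [hnext, ih v hv0 hv9 hrest]
        simp
      · simp only [if_neg h2]
        have : nextB curr ≠ v := by unfold nextB; omega
        simp [this]

-- ===== VERDICT (by name: the statement is the Claim_ definition above) =====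
theorem incremental_spec : Claim_equal_incremental := by
  intro s _ hpre
  unfold Spec_incremental incremental incremental_alt
  by_cases hlen : s.toList.length < 3
  · rw [if_pos hlen, if_pos hlen]
  · rw [if_neg hlen, if_neg hlen]
    have hdig : ∀ c ∈ s.toList, c.isDigit = true := by
      rcases hpre with h | h
      · omega
      · exact fun c hc => List.all_eq_true.mp h c hc
    have hrange : ∀ c ∈ s.toList, 48 ≤ c.toNat ∧ c.toNat ≤ 57 := by
      intro c hc
      have := hdig c hc
      simp [Char.isDigit] at this
      exact this
    cases hcs : s.toList with
    | nil => rw [hcs] at hlen; simp at hlen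
    | cons c cs =>
      have hcrange : 0 ≤ (c.toNat : Int) - 48 ∧ (c.toNat : Int) - 48 ≤ 9 := by
        have := hrange c (by rw [hcs]; simp)
        omega
      have hmem : ∀ v ∈ cs.map (fun c => (c.toNat : Int) - 48), 0 ≤ v ∧ v ≤ 9 := by
        intro v hv
        simp only [List.mem_map] at hv
        obtain ⟨d, hd, rfl⟩ := hv
        have := hrange d (by rw [hcs]; simp [hd])
        omega

      simp only [List.map_cons]
      rw [incLoop_agree _ _ hcrange.1 hcrange.2 hmem]
      simp [incLoopB, List.length_map]
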